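-- pv_equiv track=rewrite | github.com/feifei/python | python_lib/translate_extra.py | max_dis
-- ===== SOURCE A (Python) =====
-- def max_dis(L):
-- 	m = 0
-- 	start = 0
-- 	end = 0
-- 	for idx, obj in enumerate(L):
-- 		if idx == 0 :
-- 			pass
-- 		else :
-- 			if obj - L[idx-1] > m :
-- 				m = obj - L[idx-1]
-- 				start = L[idx-1]
-- 				end = obj
-- 	return [m, start, end]
-- ===== SOURCE B (Python) =====
-- def max_dis(L):
--     pairs = list(zip(L, L[1:]))
--     diffs = [y - x for (x, y) in pairs]
--     m = max(diffs, default=0)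
--     if m <= 0:
--         return [0, 0, 0]
--     x, y = pairs[diffs.index(m)]
--     return [m, x, y]
-- ===== Notes on version B (the rewrite author's own statement) =====
-- stated objective: simpler
-- what changed: Replaces A's fused single loop carrying (m, start, end) state with a two-pass build-then-find: build the consecutive-difference list, take its max, and look up the first pair achieving it.
import Mathlib
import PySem

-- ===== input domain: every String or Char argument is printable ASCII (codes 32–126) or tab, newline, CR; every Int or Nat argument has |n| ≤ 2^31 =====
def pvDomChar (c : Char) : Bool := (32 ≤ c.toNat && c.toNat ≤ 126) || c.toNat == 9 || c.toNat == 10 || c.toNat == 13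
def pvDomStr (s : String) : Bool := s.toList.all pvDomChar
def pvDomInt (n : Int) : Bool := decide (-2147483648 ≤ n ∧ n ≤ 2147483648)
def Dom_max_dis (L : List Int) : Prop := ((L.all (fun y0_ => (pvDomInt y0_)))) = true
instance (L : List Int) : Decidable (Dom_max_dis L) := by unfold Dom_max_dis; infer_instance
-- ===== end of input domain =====

-- B replaces A's fused single loop with a two-pass build-then-find over the consecutive-difference list (objective: simpler).

-- ===== PORT A =====
/-- A's loop body: skip idx == 0, else compare obj - L[idx-1] with the running max m. -/
def pvAfun (L : List Int) (st : Int × Int × Int) (p : Int × Int) : Int × Int × Int :=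
  if p.1 = 0 then st
  else
    -- L[idx-1]: 1 ≤ idx < len L here, always in range, so pyGet? is some
    let prev := (PySem.List.pyGet? L (p.1 - 1)).getD 0
    if p.2 - prev > st.1 then (p.2 - prev, prev, p.2) else st

def max_dis (L : List Int) : List Int :=
  let r := (PySem.List.enumerate L).foldl (pvAfun L) (0, 0, 0)
  [r.1, r.2.1, r.2.2]

-- ===== PORT B =====
def max_dis_alt (L : List Int) : List Int :=
  let pairs := L.zip (L.drop 1)        -- zip(L, L[1:]); L[1:] = drop 1 (exact: slice_from_one)
  let diffs := pairs.map (fun p => p.2 - p.1)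
  let m := (PySem.List.max? diffs (fun y => y)).getD 0   -- max(diffs, default=0)
  if m ≤ 0 then [0, 0, 0]
  else
    match PySem.List.index? diffs m with
    | some i =>
        let p := (PySem.List.pyGet? pairs (i : Int)).getD (0, 0)  -- in range: i < len diffs = len pairs
        [m, p.1, p.2]
    | none => [0, 0, 0]   -- unreachable: m is max of nonempty diffs, so m ∈ diffs

-- ===== PRECONDITION & SPEC =====
def Spec_max_dis (L : List Int) (out : List Int) : Prop := out = max_dis_alt L
instance (L : List Int) (out : List Int) : Decidable (Spec_max_dis L out) := by unfold Spec_max_dis; infer_instance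

-- ===== CLAIM (what is proved, stated in full; the proofs are below) =====
def Claim_equal_max_dis : Prop := ∀ (L : List Int), Dom_max_dis L → Spec_max_dis L (max_dis L)

-- ===== LEMMAS AND PROOFS =====

/-- The step A performs on each adjacent pair, once the index bookkeeping is removed. -/
def pvStep (st : Int × Int × Int) (p : Int × Int) : Int × Int × Int :=
  if p.2 - p.1 > st.1 then (p.2 - p.1, p.1, p.2) else st

/-- The first maximal positive adjacent pair, computed structurally (head wins ties). -/
def pvPick : List (Int × Int) → Int × Int × Int
  | [] => (0, 0, 0)
  | x :: ds =>
      let r := pvPick ds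
      if x.2 - x.1 > 0 ∧ x.2 - x.1 ≥ r.1 then (x.2 - x.1, x.1, x.2) else r

theorem pvPick_fst_nonneg (ds : List (Int × Int)) : 0 ≤ (pvPick ds).1 := by
  induction ds with
  | nil => simp [pvPick]
  | cons x ds ih =>
      simp only [pvPick]
      split
      · omega
      · exact ih

theorem pvPick_fst_le (ds : List (Int × Int)) (m : Int) (hm : 0 ≤ m)
    (h : ∀ p ∈ ds, p.2 - p.1 ≤ m) : (pvPick ds).1 ≤ m := by
  induction ds with
  | nil => simpa [pvPick]
  | cons x ds ih =>
      simp only [pvPick]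
      split
      · exact h x (by simp)
      · exact ih (fun p hp => h p (by simp [hp]))

theorem pvPick_zero (ds : List (Int × Int)) (h : ∀ p ∈ ds, p.2 - p.1 ≤ 0) :
    pvPick ds = (0, 0, 0) := by
  induction ds with
  | nil => rfl
  | cons x ds ih =>
      simp only [pvPick]
      have hx := h x (by simp)
      rw [if_neg (by omega)]
      exact ih (fun p hp => h p (by simp [hp]))

theorem pvFoldl_step (ds : List (Int × Int)) :
    ∀ (m s e : Int), 0 ≤ m →
      ds.foldl pvStep (m, s, e) = if (pvPick ds).1 > m then pvPick ds else (m, s, e) := by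
  induction ds with
  | nil =>
      intro m s e hm
      have : ¬ ((pvPick ([] : List (Int × Int))).1 > m) := by simp [pvPick]; omega
      simp [this]
  | cons x ds ih =>
      intro m s e hm
      have hP0 := pvPick_fst_nonneg ds
      rw [List.foldl_cons]
      have hstep : pvStep (m, s, e) x = if x.2 - x.1 > m then (x.2 - x.1, x.1, x.2) else (m, s, e) := rfl
      have hcons : pvPick (x :: ds)
          = if x.2 - x.1 > 0 ∧ x.2 - x.1 ≥ (pvPick ds).1 then (x.2 - x.1, x.1, x.2) else pvPick ds := rfl
      rw [hstep, hcons]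
      have hfst : ((x.2 - x.1, x.1, x.2) : Int × Int × Int).1 = x.2 - x.1 := rfl
      by_cases hx : x.2 - x.1 > m
      · rw [if_pos hx, ih _ _ _ (by omega)]
        by_cases hP : (pvPick ds).1 > x.2 - x.1
        · have h1 : ¬ (x.2 - x.1 > 0 ∧ x.2 - x.1 ≥ (pvPick ds).1) := by omega
          rw [if_pos hP, if_neg h1, if_pos (by omega)]
        · have h1 : x.2 - x.1 > 0 ∧ x.2 - x.1 ≥ (pvPick ds).1 := ⟨by omega, by omega⟩
          rw [if_neg hP, if_pos h1, hfst, if_pos (by omega)]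
      · rw [if_neg hx, ih _ _ _ hm]
        by_cases hc : x.2 - x.1 > 0 ∧ x.2 - x.1 ≥ (pvPick ds).1
        · have hPle : (pvPick ds).1 ≤ x.2 - x.1 := hc.2
          rw [if_pos hc, hfst, if_neg (by omega), if_neg (by omega)]
        · rw [if_neg hc]

theorem pvPick_spec (ds : List (Int × Int)) :
    ∀ (i : Nat) (hi : i < ds.length) (m : Int), 0 < m →
      (∀ p ∈ ds, p.2 - p.1 ≤ m) →
      ds[i].2 - ds[i].1 = m →
      (∀ j (hj : j < i), (ds[j]'(Nat.lt_trans hj hi)).2 - (ds[j]'(Nat.lt_trans hj hi)).1 ≠ m) →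
      pvPick ds = (m, ds[i].1, ds[i].2) := by
  induction ds with
  | nil => intro i hi; simp at hi
  | cons x ds ih =>
      intro i hi m hm hle heq hfirst
      cases i with
      | zero =>
          simp only [List.getElem_cons_zero] at heq
          simp only [pvPick]
          rw [if_pos ⟨by omega, by
            rw [heq]
            exact pvPick_fst_le ds m (by omega) (fun p hp => hle p (by simp [hp]))⟩]
          simp [heq]
      | succ i' =>
          have hi' : i' < ds.length := by simpa using Nat.lt_of_succ_lt_succ hi
          have hx0 : x.2 - x.1 ≠ m := by simpa using hfirst 0 (Nat.succ_pos i')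
          have hxle : x.2 - x.1 ≤ m := hle x (by simp)
          have htail : pvPick ds = (m, ds[i'].1, ds[i'].2) := by
            refine ih i' hi' m hm (fun p hp => hle p (by simp [hp])) (by simpa using heq) ?_
            intro j hj
            simpa using hfirst (j + 1) (Nat.succ_lt_succ hj)
          simp only [pvPick, htail]
          rw [if_neg (by
            intro hc
            have := hc.2
            exact hx0 (by omega))]
          simp

/-- A's enumerate-indexed loop over the tail equals the pair-fold. -/
theorem pvAfun_aux (t : List Int) :
    ∀ (L : List Int) (n : Nat) (h : Int) (st : Int × Int × Int),
      L.drop n = h :: t →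
      (PySem.List.enumerate t ((n : Int) + 1)).foldl (pvAfun L) st
        = ((h :: t).zip t).foldl pvStep st := by
  induction t with
  | nil => intro L n h st _; simp [PySem.List.enumerate]
  | cons a t' ih =>
      intro L n h st hdrop
      rw [PySem.List.enumerate_cons, List.foldl_cons]
      have hget : PySem.List.pyGet? L (((n : Int) + 1) - 1) = some h := by
        have h0 : (((n : Int) + 1) - 1) = ((n : Nat) : Int) := by ring
        rw [h0, PySem.List.pyGet?_natCast]
        have h1 : (L.drop n)[0]? = L[n + 0]? := List.getElem?_drop
        rw [hdrop] at h1
        simpa using h1.symm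
      have hstep : pvAfun L st ((n : Int) + 1, a) = pvStep st (h, a) := by
        simp only [pvAfun]
        rw [if_neg (by omega : ¬ ((n : Int) + 1 = 0))]
        rw [hget]
        simp [pvStep]
      rw [hstep]
      have hdrop' : L.drop (n + 1) = a :: t' := by
        rw [← List.tail_drop, hdrop]
        rfl
      have hcast : ((n : Int) + 1) + 1 = (((n + 1 : Nat)) : Int) + 1 := by push_cast; ring
      rw [hcast, ih L (n + 1) a (pvStep st (h, a)) hdrop']
      simp [List.zip_cons_cons, List.foldl_cons]

/-- A renders pvPick's result. -/
theorem pvA_eq_render (L : List Int) :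
    max_dis L = if 0 < (pvPick (L.zip (L.drop 1))).1
      then [(pvPick (L.zip (L.drop 1))).1, (pvPick (L.zip (L.drop 1))).2.1,
            (pvPick (L.zip (L.drop 1))).2.2]
      else [0, 0, 0] := by
  cases L with
  | nil =>
      simp [max_dis, PySem.List.enumerate, pvPick]
  | cons h t =>
      have e0 : PySem.List.enumerate (h :: t) 0 = (0, h) :: PySem.List.enumerate t (0 + 1) :=
        PySem.List.enumerate_cons h t 0
      have hskip : pvAfun (h :: t) (0, 0, 0) ((0 : Int), h) = (0, 0, 0) := by
        simp [pvAfun]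
      have hdrop : (h :: t).drop 0 = h :: t := rfl
      have haux := pvAfun_aux t (h :: t) 0 h (0, 0, 0) hdrop
      have hcast : ((0 : Nat) : Int) + 1 = (0 : Int) + 1 := by norm_num
      simp only [max_dis, e0, List.foldl_cons, hskip]
      rw [← hcast, haux, pvFoldl_step _ 0 0 0 le_rfl]
      have htl : (h :: t).drop 1 = t := rfl
      rw [htl]
      by_cases hp : (pvPick ((h :: t).zip t)).1 > 0
      · rw [if_pos hp, if_pos hp]
      · rw [if_neg hp, if_neg hp]

/-- B renders pvPick's result too. -/
theorem pvB_eq_render (L : List Int) :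
    max_dis_alt L = if 0 < (pvPick (L.zip (L.drop 1))).1
      then [(pvPick (L.zip (L.drop 1))).1, (pvPick (L.zip (L.drop 1))).2.1,
            (pvPick (L.zip (L.drop 1))).2.2]
      else [0, 0, 0] := by
  simp only [max_dis_alt]
  cases hmx : PySem.List.max? ((L.zip (L.drop 1)).map (fun p => p.2 - p.1)) (fun y => y) with
  | none =>
      have hnil : (L.zip (L.drop 1)).map (fun p => p.2 - p.1) = [] :=
        (PySem.List.max?_eq_none_iff _ _).mp hmx
      have hpnil : L.zip (L.drop 1) = [] := by
        exact List.map_eq_nil_iff.mp hnil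
      rw [hpnil]
      simp [pvPick]
  | some v =>
      have hmem : v ∈ (L.zip (L.drop 1)).map (fun p => p.2 - p.1) := PySem.List.max?_mem hmx
      have hmax : ∀ y ∈ (L.zip (L.drop 1)).map (fun p => p.2 - p.1), y ≤ v :=
        PySem.List.max?_isMax hmx
      simp only [Option.getD_some]
      by_cases hv : v ≤ 0
      · rw [if_pos hv]
        have hz : pvPick (L.zip (L.drop 1)) = (0, 0, 0) := by
          apply pvPick_zero
          intro p hp
          have := hmax _ (List.mem_map_of_mem hp)
          omega
        rw [hz]
        simp
      · rw [if_neg hv]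
        cases hidx : PySem.List.index? ((L.zip (L.drop 1)).map (fun p => p.2 - p.1)) v with
        | none =>
            exact absurd ((PySem.List.index?_eq_none_iff _ _).mp hidx) (by simpa using hmem)
        | some i =>
            obtain ⟨hk, heq, hfirst⟩ := PySem.List.getElem_of_index?_eq_some hidx
            have hkp : i < (L.zip (L.drop 1)).length := by
              simpa using hk
            have hd : ((L.zip (L.drop 1)).map (fun p => p.2 - p.1))[i]'hk
                = (L.zip (L.drop 1))[i].2 - (L.zip (L.drop 1))[i].1 := by
              simp
            have hpick : pvPick (L.zip (L.drop 1)) = (v, (L.zip (L.drop 1))[i].1, (L.zip (L.drop 1))[i].2) := by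
              apply pvPick_spec (L.zip (L.drop 1)) i hkp v (by omega)
              · intro p hp
                exact hmax _ (List.mem_map_of_mem hp)
              · rw [← hd, heq]
              · intro j hj
                have := hfirst j (by omega)
                simpa using this
            have hget : PySem.List.pyGet? (L.zip (L.drop 1)) (i : Int) = some ((L.zip (L.drop 1))[i]'hkp) := by
              rw [PySem.List.pyGet?_natCast]
              exact List.getElem?_eq_getElem hkp
            simp only [hget, Option.getD_some]
            rw [if_pos (by rw [hpick]; omega), hpick]

-- ===== VERDICT (by name: the statement is the Claim_ definition above) =====
theorem max_dis_spec : Claim_equal_max_dis := by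
  intro L _
  unfold Spec_max_dis
  rw [pvA_eq_render, pvB_eq_render]
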